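-- pv_equiv track=rewrite | github.com/matwoj8/Maze_Generator | Visuals/utility_functions.py | maze_dfs_traversal
-- ===== SOURCE A (Python) =====
-- def maze_dfs_traversal(maze: dict, start: tuple[int, int]) -> list[tuple[int, int]]:
--     visited = set()
--     path = []
--
--     def dfs(node):
--         path.append(node)
--         visited.add(node)
--         for neighbor in maze.get(node, []):
--             if neighbor not in visited:
--                 dfs(neighbor)
--                 path.append(node)
--
--     dfs(start)
--     return path
-- ===== SOURCE B (Python) =====
-- def maze_dfs_traversal(maze: dict, start: tuple[int, int]) -> list[tuple[int, int]]:
--     # Iterative Euler-tour DFS with an explicit stack of (node, remaining-neighbors) frames.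
--     visited = {start}
--     path = [start]
--     stack = [(start, list(maze.get(start, [])))]
--     while stack:
--         node, nbs = stack.pop()
--         if nbs:
--             nb = nbs[0]
--             stack.append((node, nbs[1:]))
--             if nb not in visited:
--                 visited.add(nb)
--                 path.append(nb)
--                 stack.append((nb, list(maze.get(nb, []))))
--         else:
--             # frame finished: Euler-tour re-append of the parent (new stack top)
--             if stack:
--                 path.append(stack[-1][0])
--     return path
-- ===== Notes on version B (the rewrite author's own statement) =====
-- stated objective: alternative
-- what changed: A's recursive Euler-tour DFS (nested dfs() with shared mutable visited/path) is replaced by an iterative while-loop over an explicit stack of (node, remaining-neighbors) frames that appends the new stack top after popping a finished frame.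
import Mathlib
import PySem

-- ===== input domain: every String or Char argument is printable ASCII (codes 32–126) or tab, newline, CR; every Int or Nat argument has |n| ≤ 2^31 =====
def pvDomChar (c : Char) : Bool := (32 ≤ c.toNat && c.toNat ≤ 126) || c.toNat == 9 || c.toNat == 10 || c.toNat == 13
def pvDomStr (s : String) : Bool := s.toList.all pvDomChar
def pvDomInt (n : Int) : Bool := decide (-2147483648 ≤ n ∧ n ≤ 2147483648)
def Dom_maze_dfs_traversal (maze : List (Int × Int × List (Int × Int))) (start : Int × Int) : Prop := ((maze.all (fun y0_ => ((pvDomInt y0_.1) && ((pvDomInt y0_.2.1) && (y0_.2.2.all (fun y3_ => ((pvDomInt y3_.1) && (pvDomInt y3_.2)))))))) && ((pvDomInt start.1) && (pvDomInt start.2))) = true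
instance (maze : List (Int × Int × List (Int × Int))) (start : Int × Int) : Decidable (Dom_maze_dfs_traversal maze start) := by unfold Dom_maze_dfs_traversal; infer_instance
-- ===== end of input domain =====

-- B replaces A's recursive Euler-tour DFS by an iterative loop over an explicit stack of
-- (node, remaining-neighbors) frames; same return value, different decomposition.

-- shared helpers: maze.get(node, []) (dict lookup, first match), the node universe, and the
-- unvisited count used as the termination measure of both ports
def pvNbrs (maze : List (Int × Int × List (Int × Int))) (n : Int × Int) : List (Int × Int) :=
  PySem.Dict.getD (PySem.Dict.mk (maze.map fun e => ((e.1, e.2.1), e.2.2))) n []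

def pvU (maze : List (Int × Int × List (Int × Int))) (start : Int × Int) : List (Int × Int) :=
  start :: (maze.map fun e => e.2.2).flatten

def pvUnvis (maze : List (Int × Int × List (Int × Int))) (start : Int × Int)
    (vis : PySem.Set (Int × Int)) : Nat :=
  ((pvU maze start).filter (fun x => !(PySem.Set.contains vis x))).length

-- the next four lemmas are cited by runB's decreasing_by (termination of port B)
theorem pv_filter_len_le {α : Type} {l : List α} {p q : α → Bool}
    (himp : ∀ x, q x = true → p x = true) : (l.filter q).length ≤ (l.filter p).length := by
  induction l with
  | nil => simp
  | cons b t ih =>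
    simp only [List.filter_cons]
    by_cases hq : q b
    · simp [hq, himp b hq]; omega
    · by_cases hp : p b <;> simp [hp, hq] <;> omega

theorem pv_filter_len_lt {α : Type} {l : List α} {p q : α → Bool}
    (himp : ∀ x, q x = true → p x = true) {a : α} (ha : a ∈ l)
    (hpa : p a = true) (hqa : q a = false) :
    (l.filter q).length < (l.filter p).length := by
  induction l with
  | nil => cases ha
  | cons b t ih =>
    simp only [List.filter_cons]
    rcases List.mem_cons.mp ha with rfl | ha
    · simp [hpa, hqa]
      have := pv_filter_len_le (l := t) himp
      omega
    · by_cases hq : q b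
      · simp [hq, himp b hq]; exact ih ha
      · by_cases hp : p b <;> simp [hp, hq] <;> have := ih ha <;> omega

theorem pvNbrs_subset_U (maze : List (Int × Int × List (Int × Int))) (start : Int × Int)
    (n x : Int × Int) (hx : x ∈ pvNbrs maze n) : x ∈ pvU maze start := by
  simp only [pvU, List.mem_cons]
  right
  simp only [List.mem_flatten, List.mem_map]
  induction maze with
  | nil =>
    simp [pvNbrs, PySem.Dict.getD, PySem.Dict.get?] at hx
  | cons e rest ih =>
    simp only [pvNbrs, List.map_cons, PySem.Dict.getD_eq_get?_getD,
      PySem.Dict.get?_mk_cons] at hx ih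
    by_cases he : ((e.1, e.2.1) == n) = true
    · simp [he] at hx
      exact ⟨e.2.2, ⟨e, by simp, rfl⟩, hx⟩
    · simp [he] at hx
      obtain ⟨l, ⟨e', he', rfl⟩, hxl⟩ := ih hx
      exact ⟨e'.2.2, ⟨e', by simp [he'], rfl⟩, hxl⟩

theorem pvUnvis_add_lt (maze : List (Int × Int × List (Int × Int))) (start : Int × Int)
    (vis : PySem.Set (Int × Int)) (nb : Int × Int) (hU : nb ∈ pvU maze start)
    (hc : nb ∉ vis) :
    pvUnvis maze start (PySem.Set.add vis nb) < pvUnvis maze start vis := by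
  unfold pvUnvis
  refine pv_filter_len_lt ?_ hU ?_ ?_
  · intro x h
    simp only [Bool.not_eq_eq_eq_not, Bool.not_true] at h ⊢
    rw [← Bool.not_eq_true] at h ⊢
    intro hcv
    exact h ((PySem.Set.contains_iff _ _).mpr
      ((PySem.Set.mem_add vis nb x).mpr (Or.inl ((PySem.Set.contains_iff _ _).mp hcv))))
  · simp only [Bool.not_eq_eq_eq_not, Bool.not_true, ← Bool.not_eq_true]
    intro hcv
    exact hc ((PySem.Set.contains_iff _ _).mp hcv)
  · have h2 : PySem.Set.contains (PySem.Set.add vis nb) nb = true :=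
      (PySem.Set.contains_iff _ _).mpr ((PySem.Set.mem_add vis nb nb).mpr (Or.inr rfl))
    simp

-- ===== PORT A =====
-- A's recursive dfs: state (visited, path); the Nat is a fuel counter that only makes the
-- recursion total — the fuel used in maze_dfs_traversal below is proved sufficient.
def dfsA (maze : List (Int × Int × List (Int × Int))) :
    Nat → (Int × Int) → (PySem.Set (Int × Int) × List (Int × Int)) →
    Option (PySem.Set (Int × Int) × List (Int × Int))
  | 0, _, _ => none
  | f + 1, n, st =>
      (pvNbrs maze n).foldlM
        (fun st' nb =>
          if PySem.Set.contains st'.1 nb then some st'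
          else (dfsA maze f nb st').map fun s => (s.1, s.2 ++ [n]))
        (PySem.Set.add st.1 n, st.2 ++ [n])

def maze_dfs_traversal (maze : List (Int × Int × List (Int × Int))) (start : Int × Int) :
    List (Int × Int) :=
  match dfsA maze (pvU maze start).length start (PySem.Set.empty, []) with
  | some st => st.2
  | none => []

-- ===== PORT B =====
-- `if stack: path.append(stack[-1][0])` after popping a finished frame
def afterPop (rest : List ((Int × Int) × List (Int × Int)))
    (st : PySem.Set (Int × Int) × List (Int × Int)) :
    PySem.Set (Int × Int) × List (Int × Int) :=
  match rest with
  | [] => st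
  | (m, _) :: _ => (st.1, st.2 ++ [m])

@[simp] theorem afterPop_fst (rest : List ((Int × Int) × List (Int × Int)))
    (st : PySem.Set (Int × Int) × List (Int × Int)) : (afterPop rest st).1 = st.1 := by
  cases rest with
  | nil => rfl
  | cons fr r => rcases fr with ⟨m, l⟩; rfl

-- the while-loop of Source B; the Prop argument records that every pending neighbour list is
-- contained in pvU (true by construction) and is used only for termination
def runB (maze : List (Int × Int × List (Int × Int))) (start : Int × Int) :
    (stack : List ((Int × Int) × List (Int × Int))) →
    (st : PySem.Set (Int × Int) × List (Int × Int)) →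
    (h : ∀ fr ∈ stack, ∀ x ∈ fr.2, x ∈ pvU maze start) →
    PySem.Set (Int × Int) × List (Int × Int)
  | [], st, _ => st
  | (_, []) :: rest, st, h =>
      runB maze start rest (afterPop rest st)
        (fun fr hfr => h fr (List.mem_cons_of_mem _ hfr))
  | (n, nb :: nbs) :: rest, st, h =>
      if hc : PySem.Set.contains st.1 nb = true then
        runB maze start ((n, nbs) :: rest) st
          (fun fr hfr => by
            rcases List.mem_cons.mp hfr with rfl | hfr
            · exact fun x hx => h (n, nb :: nbs) (by simp) x (by simp [hx])
            · exact h fr (List.mem_cons_of_mem _ hfr))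
      else
        runB maze start ((nb, pvNbrs maze nb) :: (n, nbs) :: rest)
          (PySem.Set.add st.1 nb, st.2 ++ [nb])
          (fun fr hfr => by
            rcases List.mem_cons.mp hfr with rfl | hfr
            · exact fun x hx => pvNbrs_subset_U maze start nb x hx
            · rcases List.mem_cons.mp hfr with rfl | hfr
              · exact fun x hx => h (n, nb :: nbs) (by simp) x (by simp [hx])
              · exact h fr (List.mem_cons_of_mem _ hfr))
  termination_by stack st _ =>
    (pvUnvis maze start st.1, (stack.map (fun fr => fr.2.length + 1)).sum)
  decreasing_by
  · rw [afterPop_fst]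
    exact Prod.Lex.right _ (by simp [List.sum_cons])
  · exact Prod.Lex.right _ (by simp [List.sum_cons])
  · exact Prod.Lex.left _ _
      (pvUnvis_add_lt maze start st.1 nb
        (h (n, nb :: nbs) (by simp) nb (by simp)) (by simpa using hc))

def maze_dfs_traversal_alt (maze : List (Int × Int × List (Int × Int))) (start : Int × Int) :
    List (Int × Int) :=
  (runB maze start [(start, pvNbrs maze start)]
      (PySem.Set.add PySem.Set.empty start, [start])
      (fun fr hfr => by
        rcases List.mem_cons.mp hfr with rfl | hfr
        · exact fun x hx => pvNbrs_subset_U maze start start x hx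
        · cases hfr)).2

-- ===== PRECONDITION & SPEC =====
def Spec_maze_dfs_traversal (maze : List (Int × Int × List (Int × Int))) (start : Int × Int) (out : List (Int × Int)) : Prop := out = maze_dfs_traversal_alt maze start
instance (maze : List (Int × Int × List (Int × Int))) (start : Int × Int) (out : List (Int × Int)) : Decidable (Spec_maze_dfs_traversal maze start out) := by unfold Spec_maze_dfs_traversal; infer_instance

-- ===== CLAIM (what is proved, stated in full; the proofs are below) =====
def Claim_equal_maze_dfs_traversal : Prop := ∀ (maze : List (Int × Int × List (Int × Int))) (start : Int × Int), Dom_maze_dfs_traversal maze start → Spec_maze_dfs_traversal maze start (maze_dfs_traversal maze start)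

-- ===== LEMMAS AND PROOFS =====
-- stepA names the loop body of dfsA (dfsA_succ is definitional)
def stepA (maze : List (Int × Int × List (Int × Int))) (f : Nat) (n : Int × Int)
    (st : PySem.Set (Int × Int) × List (Int × Int)) (nb : Int × Int) :
    Option (PySem.Set (Int × Int) × List (Int × Int)) :=
  if PySem.Set.contains st.1 nb then some st
  else (dfsA maze f nb st).map fun s => (s.1, s.2 ++ [n])

theorem dfsA_succ (maze : List (Int × Int × List (Int × Int))) (f : Nat) (n : Int × Int)
    (st : PySem.Set (Int × Int) × List (Int × Int)) :
    dfsA maze (f + 1) n st =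
      (pvNbrs maze n).foldlM (stepA maze f n) (PySem.Set.add st.1 n, st.2 ++ [n]) := rfl

theorem pvUnvis_pos (maze : List (Int × Int × List (Int × Int))) (start : Int × Int)
    (vis : PySem.Set (Int × Int)) (nb : Int × Int) (hU : nb ∈ pvU maze start)
    (hc : PySem.Set.contains vis nb = false) : 1 ≤ pvUnvis maze start vis := by
  have hnot : nb ∉ vis := by simpa using hc
  have : nb ∈ (pvU maze start).filter (fun x => !(PySem.Set.contains vis x)) :=
    List.mem_filter.mpr ⟨hU, by simp [hnot]⟩
  have := List.length_pos_of_mem this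
  unfold pvUnvis
  omega

theorem pvUnvis_le (maze : List (Int × Int × List (Int × Int))) (start : Int × Int)
    (a b : PySem.Set (Int × Int)) (hsub : ∀ x, x ∈ a → x ∈ b) :
    pvUnvis maze start b ≤ pvUnvis maze start a := by
  unfold pvUnvis
  refine pv_filter_len_le ?_
  intro x h
  simp only [Bool.not_eq_eq_eq_not, Bool.not_true, ← Bool.not_eq_true] at h ⊢
  intro hcv
  exact h ((PySem.Set.contains_iff _ _).mpr (hsub x ((PySem.Set.contains_iff _ _).mp hcv)))

theorem pvUnvis_empty (maze : List (Int × Int × List (Int × Int))) (start : Int × Int) :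
    pvUnvis maze start PySem.Set.empty = (pvU maze start).length := by
  simp [pvUnvis, PySem.Set.empty]

-- fuel sufficiency for port A: with fuel bounding the unvisited count the neighbour fold
-- returns `some`, and the visited set only grows
theorem suffLoop (maze : List (Int × Int × List (Int × Int))) (start : Int × Int) :
    ∀ (f : Nat) (nbs : List (Int × Int)) (n : Int × Int)
      (st : PySem.Set (Int × Int) × List (Int × Int)),
      (∀ x ∈ nbs, x ∈ pvU maze start) → pvUnvis maze start st.1 ≤ f →
      ∃ st', nbs.foldlM (stepA maze f n) st = some st' ∧ ∀ x, x ∈ st.1 → x ∈ st'.1 := by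
  intro f
  induction f using Nat.strong_induction_on with
  | _ f IH =>
    intro nbs
    induction nbs with
    | nil =>
      intro n st _ _
      exact ⟨st, by simp, fun x hx => hx⟩
    | cons nb rest ihr =>
      intro n st hsub hle
      by_cases hc : PySem.Set.contains st.1 nb = true
      · obtain ⟨st', h1, h2⟩ := ihr n st (fun x hx => hsub x (by simp [hx])) hle
        have hmem : nb ∈ st.1 := (PySem.Set.contains_iff _ _).mp hc
        exact ⟨st', by simp [List.foldlM_cons, stepA, hmem, h1], h2⟩
      · -- fresh neighbour: recurse with one less fuel
        have hc' : PySem.Set.contains st.1 nb = false := by simpa using hc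
        have hnot : nb ∉ st.1 := by simpa using hc'
        have hU : nb ∈ pvU maze start := hsub nb (by simp)
        have hpos := pvUnvis_pos maze start st.1 nb hU hc'
        obtain ⟨g, rfl⟩ : ∃ g, f = g + 1 := ⟨f - 1, by omega⟩
        have hlt := pvUnvis_add_lt maze start st.1 nb hU hnot
        obtain ⟨st₁, hd, hm₁⟩ := IH g (by omega) (pvNbrs maze nb) nb
          (PySem.Set.add st.1 nb, st.2 ++ [nb])
          (fun x hx => pvNbrs_subset_U maze start nb x hx)
          (by simp only; omega)
        obtain ⟨st', hl, hm₂⟩ := ihr n (st₁.1, st₁.2 ++ [n])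
          (fun x hx => hsub x (by simp [hx]))
          (by
            have h1 : pvUnvis maze start st₁.1 ≤
                pvUnvis maze start (PySem.Set.add st.1 nb) :=
              pvUnvis_le maze start _ _ (fun x hx => hm₁ x hx)
            simp only
            omega)
        refine ⟨st', ?_, fun x hx => hm₂ x (hm₁ x ((PySem.Set.mem_add _ _ _).mpr (Or.inl hx)))⟩
        simp only [List.foldlM_cons, stepA, dfsA_succ, hd]
        simp [hnot]
        simpa using hl

-- simulation: one stack frame of runB computes A's neighbour fold, then the Euler-tour
-- re-append of the parent (afterPop) on the way out
theorem sim (maze : List (Int × Int × List (Int × Int))) (start : Int × Int) :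
    ∀ (f : Nat) (nbs : List (Int × Int)) (n : Int × Int)
      (st st' : PySem.Set (Int × Int) × List (Int × Int))
      (rest : List ((Int × Int) × List (Int × Int)))
      (h : ∀ fr ∈ (n, nbs) :: rest, ∀ x ∈ fr.2, x ∈ pvU maze start)
      (h' : ∀ fr ∈ rest, ∀ x ∈ fr.2, x ∈ pvU maze start),
      nbs.foldlM (stepA maze f n) st = some st' →
      runB maze start ((n, nbs) :: rest) st h = runB maze start rest (afterPop rest st') h' := by
  intro f
  induction f using Nat.strong_induction_on with
  | _ f IH =>
    intro nbs
    induction nbs with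
    | nil =>
      intro n st st' rest h h' hfold
      simp only [List.foldlM_nil] at hfold
      cases hfold
      rw [runB]
    | cons nb rest ihr =>
      intro n st st' rest₀ h h' hfold
      simp only [List.foldlM_cons, stepA] at hfold
      by_cases hmem : nb ∈ st.1
      · rw [if_pos ((PySem.Set.contains_iff _ _).mpr hmem)] at hfold
        simp only [Option.bind_eq_bind, Option.bind_some] at hfold
        rw [runB]
        rw [dif_pos ((PySem.Set.contains_iff _ _).mpr hmem)]
        have hinv : ∀ fr ∈ (n, rest) :: rest₀, ∀ x ∈ fr.2, x ∈ pvU maze start := by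
          intro fr hfr
          rcases List.mem_cons.mp hfr with rfl | hfr
          · exact fun x hx => h (n, nb :: rest) (by simp) x (by simp [hx])
          · exact h fr (List.mem_cons_of_mem _ hfr)
        exact ihr n st st' rest₀ hinv h' hfold
      · rw [if_neg (fun hcc => hmem ((PySem.Set.contains_iff _ _).mp hcc))] at hfold
        rcases hd : dfsA maze f nb st with _ | s1
        · simp [hd] at hfold
        · simp only [hd, Option.map_some, Option.bind_eq_bind, Option.bind_some] at hfold
          obtain ⟨g, rfl⟩ : ∃ g, f = g + 1 := by
            cases f with
            | zero => simp [dfsA] at hd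
            | succ g => exact ⟨g, rfl⟩
          rw [dfsA_succ] at hd
          have hinv : ∀ fr ∈ (n, rest) :: rest₀, ∀ x ∈ fr.2, x ∈ pvU maze start := by
            intro fr hfr
            rcases List.mem_cons.mp hfr with rfl | hfr
            · exact fun x hx => h (n, nb :: rest) (by simp) x (by simp [hx])
            · exact h fr (List.mem_cons_of_mem _ hfr)
          have hinv2 : ∀ fr ∈ (nb, pvNbrs maze nb) :: (n, rest) :: rest₀,
              ∀ x ∈ fr.2, x ∈ pvU maze start := by
            intro fr hfr
            rcases List.mem_cons.mp hfr with rfl | hfr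
            · exact fun x hx => pvNbrs_subset_U maze start nb x hx
            · exact hinv fr hfr
          rw [runB]
          rw [dif_neg (fun hcc => hmem ((PySem.Set.contains_iff _ _).mp hcc))]
          rw [IH g (by omega) (pvNbrs maze nb) nb _ s1 ((n, rest) :: rest₀) hinv2 hinv hd]
          show runB maze start ((n, rest) :: rest₀) (s1.1, s1.2 ++ [n]) _ = _
          exact ihr n (s1.1, s1.2 ++ [n]) st' rest₀ hinv h' hfold

theorem main_eq (maze : List (Int × Int × List (Int × Int))) (start : Int × Int) :
    maze_dfs_traversal maze start = maze_dfs_traversal_alt maze start := by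
  unfold maze_dfs_traversal maze_dfs_traversal_alt
  have hlen : (pvU maze start).length = (maze.map fun e => e.2.2).flatten.length + 1 := by
    simp [pvU]
  have hstart : start ∈ pvU maze start := by simp [pvU]
  have hempty : start ∉ (PySem.Set.empty : PySem.Set (Int × Int)) := by
    simp [PySem.Set.empty]
  have hlt := pvUnvis_add_lt maze start PySem.Set.empty start hstart hempty
  have hemp := pvUnvis_empty maze start
  obtain ⟨st', hfold, -⟩ := suffLoop maze start ((maze.map fun e => e.2.2).flatten.length)
      (pvNbrs maze start) start
      (PySem.Set.add PySem.Set.empty start, ([] : List (Int × Int)) ++ [start])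
      (fun x hx => pvNbrs_subset_U maze start start x hx)
      (by simp only; omega)
  have hfold' : (pvNbrs maze start).foldlM
      (stepA maze ((maze.map fun e => e.2.2).flatten.length) start)
      (PySem.Set.add PySem.Set.empty start, [start]) = some st' := by
    simpa using hfold
  have hA : dfsA maze (pvU maze start).length start (PySem.Set.empty, []) = some st' := by
    rw [hlen, dfsA_succ]
    simpa using hfold'
  rw [hA]
  have hsim := sim maze start ((maze.map fun e => e.2.2).flatten.length)
      (pvNbrs maze start) start
      (PySem.Set.add PySem.Set.empty start, [start]) st' []
      (fun fr hfr => by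
        rcases List.mem_cons.mp hfr with rfl | hfr
        · exact fun x hx => pvNbrs_subset_U maze start start x hx
        · cases hfr)
      (fun fr hfr => by cases hfr)
      hfold'
  rw [hsim]
  rw [runB]
  rfl

-- ===== VERDICT (by name: the statement is the Claim_ definition above) =====
theorem maze_dfs_traversal_spec : Claim_equal_maze_dfs_traversal := by
  intro maze start _
  unfold Spec_maze_dfs_traversal
  exact main_eq maze start
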